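-- pv_equiv track=rewrite | github.com/Tanxinxin00/Bioinformatics-algorithms | AntiBiotics.py | TrimMasstides
-- ===== SOURCE A (Python) =====
-- def LinearScoreMasstide(Masstide: str, Spectrum: list[int]) -> int:
--     linearsubmasses=LinearSubMass(Masstide)
--     linearsubmasses.append(Masstide)
--     theospec=MassSpec(linearsubmasses)
--     theospec.insert(0,0)
--     theospec.sort()
--     n=len(theospec)
--     k=len(Spectrum)
--     i=0
--     j=0
--     count=0
--     while i<n and j<k :
--         if theospec[i]==Spectrum[j]:
--             count+=1
--             i+=1
--             j+=1
--         elif theospec[i]<Spectrum[j]: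
--             i+=1
--         else:
--             j+=1
--     return count
--
-- def LinearSubMass(Masstide:list[int]) -> list[int]:
--     n=len(Masstide)
--     substrings=[]
--     for k in range(1,n):
--         for i in range(n-k+1):
--             substring=Masstide[i:i+k]
--             substrings.append(substring)
--     return substrings
--
-- def TrimMasstides(Masstides,Spectrum,N):
--     # construct a score dictionary that stores every score and every peptide corresponding to that score
--     Scoredict={}
--     for mass in Masstides:
--         score=LinearScoreMasstide(mass,Spectrum)
--         if score not in Scoredict.keys():
--             Scoredict[score]=[mass]
--         else:
--             Scoredict[score].append(mass)
--
--     # Sort the scores in descending order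
--     Scores=list(Scoredict.keys())
--     Scores.sort(reverse=True)
--
--     # append the masstides in descending order until the number exceeds N
--     board=[]
--     num=0
--     for i in range(len(Scores)):
--         board.extend(Scoredict[Scores[i]])
--         num+=len(Scoredict[Scores[i]])
--         if num>=N:
--             break
--
--     return board
--
-- def MassSpec(SubMasses):
--     spec=[]
--     for submass in SubMasses:
--         spec.append(Sum(submass))
--     return spec
--
-- def Sum(Masstide:list[int]):
--     sum=0
--     for mass in Masstide:
--         sum+=mass
--     return sum
-- ===== SOURCE B (Python) =====
-- def _linear_score(pep, Spectrum):
--     # prefix sums: mass of pep[i:i+k] is prefix[i+k] - prefix[i], computed in O(1)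
--     prefix = [0]
--     for x in pep:
--         prefix.append(prefix[-1] + x)
--     n = len(pep)
--     theo = [0]
--     for length in range(1, n):
--         for i in range(n - length + 1):
--             theo.append(prefix[i + length] - prefix[i])
--     theo.append(prefix[n])
--     theo.sort()
--     i = j = count = 0
--     while i < len(theo) and j < len(Spectrum):
--         if theo[i] == Spectrum[j]:
--             count += 1
--             i += 1
--             j += 1
--         elif theo[i] < Spectrum[j]:
--             i += 1
--         else:
--             j += 1
--     return count
--
--
-- def TrimMasstides(Masstides, Spectrum, N):
--     scores = [_linear_score(pep, Spectrum) for pep in Masstides]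
--     pairs = list(zip(scores, Masstides))
--     board = []
--     for s in sorted(set(scores), reverse=True):
--         for sc, pep in pairs:
--             if sc == s:
--                 board.append(pep)
--         if len(board) >= N:
--             break
--     return board
-- ===== Notes on version B (the rewrite author's own statement) =====
-- stated objective: faster
-- what changed: B scores each peptide via a prefix-sum table so every subpeptide mass is one subtraction instead of materialising the slice and summing it (O(n^3) -> O(n^2) per peptide before the sort), and selects the leaderboard by iterating the distinct scores in descending order with a filter over (score, peptide) pairs instead of building a score-keyed dict of groups.
import Mathlib
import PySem

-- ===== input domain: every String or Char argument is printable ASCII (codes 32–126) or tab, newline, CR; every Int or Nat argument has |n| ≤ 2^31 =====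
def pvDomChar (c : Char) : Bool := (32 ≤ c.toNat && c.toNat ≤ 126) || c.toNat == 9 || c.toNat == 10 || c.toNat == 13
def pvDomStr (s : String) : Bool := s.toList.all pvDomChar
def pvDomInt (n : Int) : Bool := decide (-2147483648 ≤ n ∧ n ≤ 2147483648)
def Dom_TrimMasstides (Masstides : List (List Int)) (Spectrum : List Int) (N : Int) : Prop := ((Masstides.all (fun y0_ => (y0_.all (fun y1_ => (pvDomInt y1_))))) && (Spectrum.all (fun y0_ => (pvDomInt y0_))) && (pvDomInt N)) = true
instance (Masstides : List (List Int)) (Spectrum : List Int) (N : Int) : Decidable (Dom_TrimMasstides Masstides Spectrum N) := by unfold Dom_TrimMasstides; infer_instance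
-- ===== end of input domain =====

-- B scores each peptide through a prefix-sum table (one subtraction per subpeptide mass instead of
-- slicing and summing) and selects the leaderboard by filtering (score, peptide) pairs per distinct
-- descending score instead of building a score-keyed dict of groups.

-- ===== PORT A =====

-- the two-pointer count of matches between the (sorted) theoretical spectrum and Spectrum:
-- the indices i, j of A's while loop are represented by the corresponding suffixes.
-- (B's Python contains the identical while loop, so both ports share this helper.)
def pvCountMatches : List Int → List Int → Int → Int
  | x :: xs, y :: ys, count =>
      if x = y then pvCountMatches xs ys (count + 1)
      else if x < y then pvCountMatches xs (y :: ys) count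
      else pvCountMatches (x :: xs) ys count
  | _, _, count => count
termination_by xs ys _ => xs.length + ys.length

def pvSum (Masstide : List Int) : Int :=
  Masstide.foldl (fun sum mass => sum + mass) 0

def pvMassSpec (SubMasses : List (List Int)) : List Int :=
  SubMasses.foldl (fun spec submass => spec ++ [pvSum submass]) []

def pvLinearSubMass (Masstide : List Int) : List (List Int) :=
  let n : Int := PySem.List.len Masstide
  (PySem.List.pyRange 1 n 1).foldl (fun substrings k =>
    (PySem.List.pyRange 0 (n - k + 1) 1).foldl (fun substrings i =>
      substrings ++ [PySem.List.slice Masstide (some i) (some (i + k))]) substrings) []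

def pvLinearScoreMasstide (Masstide : List Int) (Spectrum : List Int) : Int :=
  let linearsubmasses := pvLinearSubMass Masstide ++ [Masstide]
  let theospec := pvMassSpec linearsubmasses
  let theospec := PySem.List.insert theospec 0 0
  let theospec := PySem.List.sorted theospec (fun x => x) false
  pvCountMatches theospec Spectrum 0

-- "for i in range(len(Scores)): board.extend(…); num += …; if num >= N: break"
def pvExtendLoop (d : PySem.Dict Int (List (List Int))) (N : Int) :
    List Int → List (List Int) → Int → List (List Int)
  | [], board, _ => board
  | s :: rest, board, num =>
      let g := d.getD s []
      let board := board ++ g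
      let num := num + PySem.List.len g
      if num ≥ N then board else pvExtendLoop d N rest board num

def TrimMasstides (Masstides : List (List Int)) (Spectrum : List Int) (N : Int) : List (List Int) :=
  let Scoredict := Masstides.foldl (fun d mass =>
      let score := pvLinearScoreMasstide mass Spectrum
      if d.contains score = false then d.insert score [mass]
      else d.insert score (d.getD score [] ++ [mass])) PySem.Dict.empty
  let Scores := PySem.List.sorted Scoredict.keys (fun x => x) true
  pvExtendLoop Scoredict N Scores [] 0

-- ===== PORT B =====

-- prefix = [0]; for x in pep: prefix.append(prefix[-1] + x)
def pvPrefix (pep : List Int) : List Int :=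
  pep.foldl (fun acc x => acc ++ [PySem.List.pyGetD acc (-1) 0 + x]) [0]

def pvLinearScoreFast (pep : List Int) (Spectrum : List Int) : Int :=
  let pre := pvPrefix pep
  let n : Int := PySem.List.len pep
  let theo := (PySem.List.pyRange 1 n 1).foldl (fun theo length =>
      (PySem.List.pyRange 0 (n - length + 1) 1).foldl (fun theo i =>
        theo ++ [PySem.List.pyGetD pre (i + length) 0 - PySem.List.pyGetD pre i 0]) theo) [0]
  let theo := theo ++ [PySem.List.pyGetD pre n 0]
  let theo := PySem.List.sorted theo (fun x => x) false
  pvCountMatches theo Spectrum 0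

-- "for s in sorted(set(scores), reverse=True): for sc, pep in pairs: if sc == s: board.append(pep); if len(board) >= N: break"
def pvTakeGroups (pairs : List (Int × List Int)) (N : Int) :
    List Int → List (List Int) → List (List Int)
  | [], board => board
  | s :: rest, board =>
      let board := pairs.foldl (fun b p => if p.1 == s then b ++ [p.2] else b) board
      if PySem.List.len board ≥ N then board else pvTakeGroups pairs N rest board

def TrimMasstides_alt (Masstides : List (List Int)) (Spectrum : List Int) (N : Int) : List (List Int) :=
  let scores := Masstides.map (fun pep => pvLinearScoreFast pep Spectrum)
  let pairs := scores.zip Masstides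
  pvTakeGroups pairs N (PySem.List.sorted (PySem.Set.ofList scores) (fun x => x) true) []

-- ===== PRECONDITION & SPEC =====
def Spec_TrimMasstides (Masstides : List (List Int)) (Spectrum : List Int) (N : Int) (out : List (List Int)) : Prop := out = TrimMasstides_alt Masstides Spectrum N
instance (Masstides : List (List Int)) (Spectrum : List Int) (N : Int) (out : List (List Int)) : Decidable (Spec_TrimMasstides Masstides Spectrum N out) := by unfold Spec_TrimMasstides; infer_instance

-- ===== CLAIM (what is proved, stated in full; the proofs are below) =====
def Claim_equal_TrimMasstides : Prop := ∀ (Masstides : List (List Int)) (Spectrum : List Int) (N : Int), Dom_TrimMasstides Masstides Spectrum N → Spec_TrimMasstides Masstides Spectrum N (TrimMasstides Masstides Spectrum N)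

-- ===== LEMMAS AND PROOFS =====

theorem pvSum_eq (xs : List Int) : pvSum xs = xs.sum := by
  simpa using PySem.List.foldl_add (g := fun x => x) (l := xs) (a := 0)
theorem foldl_pre (pep : List Int) : ∀ (acc : List Int), acc ≠ [] →
    pep.foldl (fun acc x => acc ++ [PySem.List.pyGetD acc (-1) 0 + x]) acc
      = acc ++ (List.range pep.length).map
          (fun j => PySem.List.pyGetD acc (-1) 0 + (pep.take (j+1)).sum) := by
  induction pep with
  | nil => simp
  | cons x t ih =>
    intro acc hacc
    simp only [List.foldl_cons]
    rw [ih (acc ++ [PySem.List.pyGetD acc (-1) 0 + x]) (by simp)]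
    simp only [PySem.List.pyGetD_neg_one_append_singleton, List.length_cons,
      List.range_succ_eq_map, List.map_cons, List.map_map, List.append_assoc]
    congr 1
    simp only [List.singleton_append]
    congr 1
    · simp
    · apply List.map_congr_left
      intro a _
      simp [Function.comp, add_assoc]

theorem pvPrefix_eq (pep : List Int) :
    pvPrefix pep = (List.range (pep.length + 1)).map (fun j => (pep.take j).sum) := by
  rw [pvPrefix, foldl_pre pep [0] (by simp), List.range_succ_eq_map]
  simp [List.map_map, Function.comp, PySem.List.pyGetD, PySem.List.pyGet?, PySem.List.pyIdx?]

theorem pvPrefix_getD (pep : List Int) (j : Nat) (hj : j ≤ pep.length) :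
    PySem.List.pyGetD (pvPrefix pep) (j : Int) 0 = (pep.take j).sum := by
  rw [pvPrefix_eq]
  rw [PySem.List.pyGetD_natCast]
  rw [List.getD_eq_getElem _ _ (by simpa using by omega)]
  simp

theorem pvLinearSubMass_eq (m : List Int) :
    pvLinearSubMass m = (PySem.List.pyRange 1 (PySem.List.len m) 1).flatMap
      (fun k => (PySem.List.pyRange 0 (PySem.List.len m - k + 1) 1).map
        (fun i => PySem.List.slice m (some i) (some (i + k)))) := by
  rw [pvLinearSubMass]
  simp only [PySem.List.foldl_append_singleton_eq_map, PySem.List.foldl_append_eq_flatMap,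
    List.nil_append]

theorem pairwise_term (m : List Int) (a b : Nat) (hb : 1 ≤ b) (hab : a + b ≤ m.length) :
    pvSum (PySem.List.slice m (some (a : Int)) (some ((a : Int) + (b : Int))))
      = PySem.List.pyGetD (pvPrefix m) ((a : Int) + (b : Int)) 0
        - PySem.List.pyGetD (pvPrefix m) (a : Int) 0 := by
  have h1 : (a : Int) + (b : Int) = ((a + b : Nat) : Int) := by push_cast; ring
  rw [PySem.List.slice_natCast_add, pvSum_eq, h1, pvPrefix_getD m (a + b) hab,
    pvPrefix_getD m a (by omega), List.take_add, List.sum_append]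
  ring

theorem pre_theo_eq (m : List Int) :
    PySem.List.insert (pvMassSpec (pvLinearSubMass m ++ [m])) 0 0 =
      ((PySem.List.pyRange 1 (PySem.List.len m) 1).foldl (fun theo length =>
        (PySem.List.pyRange 0 (PySem.List.len m - length + 1) 1).foldl (fun theo i =>
          theo ++ [PySem.List.pyGetD (pvPrefix m) (i + length) 0 - PySem.List.pyGetD (pvPrefix m) i 0]) theo) [0])
      ++ [PySem.List.pyGetD (pvPrefix m) (PySem.List.len m) 0] := by
  rw [PySem.List.insert_zero, pvMassSpec, PySem.List.foldl_append_singleton_eq_map,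
    pvLinearSubMass_eq]
  simp only [PySem.List.foldl_append_singleton_eq_map, PySem.List.foldl_append_eq_flatMap]
  have hlast : PySem.List.pyGetD (pvPrefix m) (PySem.List.len m) 0 = pvSum m := by
    rw [PySem.List.len_eq, pvPrefix_getD m m.length (le_refl _), List.take_length, pvSum_eq]
  rw [hlast]
  simp only [List.map_append, List.map_flatMap, List.map_map, List.map_cons, List.map_nil,
    List.nil_append, List.cons_append]
  congr 1
  congr 1
  apply List.flatMap_congr
  intro k hk
  have hk' := (PySem.List.mem_pyRange_one).mp hk
  apply List.map_congr_left
  intro i hi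
  have hi' := (PySem.List.mem_pyRange_one).mp hi
  simp only [Function.comp_apply]
  have ha : i = ((i.toNat : Nat) : Int) := by omega
  have hbk : k = ((k.toNat : Nat) : Int) := by omega
  rw [ha, hbk]
  exact pairwise_term m i.toNat k.toNat (by omega) (by simp [PySem.List.len_eq] at hk' hi'; omega)


theorem score_eq (m Spectrum : List Int) :
    pvLinearScoreFast m Spectrum = pvLinearScoreMasstide m Spectrum := by
  rw [pvLinearScoreFast, pvLinearScoreMasstide, pre_theo_eq]

theorem dict_foldl_getD (f : List Int → Int) (ms : List (List Int)) :
    ∀ (d : PySem.Dict Int (List (List Int))) (s : Int),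
    (ms.foldl (fun d mass =>
      if d.contains (f mass) = false then d.insert (f mass) [mass]
      else d.insert (f mass) (d.getD (f mass) [] ++ [mass])) d).getD s []
      = d.getD s [] ++ (ms.filter (fun mass => f mass == s)) := by
  induction ms with
  | nil => simp
  | cons mass ms ih =>
    intro d s
    simp only [List.foldl_cons, List.filter_cons]
    rw [ih]
    by_cases hs : f mass = s
    · subst hs
      simp only [beq_self_eq_true, if_pos]
      by_cases hc : d.contains (f mass) = false
      · rw [if_pos hc, PySem.Dict.getD_insert_self, PySem.Dict.getD_of_not_contains _ _ hc]
        simp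
      · rw [if_neg hc, PySem.Dict.getD_insert_self]
        simp
    · have hbe : (f mass == s) = false := by simpa using hs
      rw [hbe]
      by_cases hc : d.contains (f mass) = false
      · rw [if_pos hc, PySem.Dict.getD_insert_of_ne _ _ _ (Ne.symm hs)]
        simp
      · rw [if_neg hc, PySem.Dict.getD_insert_of_ne _ _ _ (Ne.symm hs)]
        simp

theorem dict_foldl_keys (f : List Int → Int) (ms : List (List Int))
    (d : PySem.Dict Int (List (List Int))) :
    (ms.foldl (fun d mass =>
      if d.contains (f mass) = false then d.insert (f mass) [mass]
      else d.insert (f mass) (d.getD (f mass) [] ++ [mass])) d).keys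
      = PySem.Set.update d.keys (ms.map f) := by
  rw [PySem.List.foldl_congr_mem ms _ (fun d mass => d.insert (f mass)
      (if d.contains (f mass) = false then [mass] else d.getD (f mass) [] ++ [mass])) d
      (by intro d mass _
          by_cases hc : d.contains (f mass) = false <;> simp [hc])]
  exact PySem.Dict.keys_foldl_insert_key ms f _ d

theorem zip_filter_eq (f : List Int → Int) (ms : List (List Int)) (s : Int) :
    (((ms.map f).zip ms).filter (fun p => p.1 == s)).map (·.2)
      = ms.filter (fun mass => f mass == s) := by
  induction ms with
  | nil => simp
  | cons m ms ih =>
    simp only [List.map_cons, List.zip_cons_cons, List.filter_cons]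
    by_cases h : (f m == s) = true
    · simp [h, ih]
    · simp only [h] at *
      simp [ih]

theorem loops_eq (f : List Int → Int) (ms : List (List Int))
    (d : PySem.Dict Int (List (List Int))) (N : Int)
    (hd : ∀ s, d.getD s [] = ms.filter (fun mass => f mass == s)) :
    ∀ (K : List Int) (board : List (List Int)) (num : Int),
      num = PySem.List.len board →
      pvExtendLoop d N K board num = pvTakeGroups ((ms.map f).zip ms) N K board := by
  intro K
  induction K with
  | nil => intro board num h; rfl
  | cons s rest ih =>
    intro board num h
    rw [pvExtendLoop, pvTakeGroups]
    have hinner : ((ms.map f).zip ms).foldl (fun b p => if p.1 == s then b ++ [p.2] else b) board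
        = board ++ d.getD s [] := by
      rw [PySem.List.foldl_append_if, hd, zip_filter_eq]
    rw [hinner]
    simp only [PySem.List.len_eq]
    have hlen : num + ((d.getD s []).length : Int) = ((board ++ d.getD s []).length : Int) := by
      simp [h, PySem.List.len_eq]
    rw [hlen]
    split
    · rfl
    · exact ih _ _ rfl

-- ===== VERDICT (by name: the statement is the Claim_ definition above) =====
theorem TrimMasstides_spec : Claim_equal_TrimMasstides := by
  intro ms Spectrum N _
  unfold Spec_TrimMasstides
  simp only [TrimMasstides, TrimMasstides_alt]
  have hmap : ms.map (fun pep => pvLinearScoreFast pep Spectrum)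
      = ms.map (fun mass => pvLinearScoreMasstide mass Spectrum) :=
    List.map_congr_left (fun m _ => score_eq m Spectrum)
  rw [hmap]
  rw [dict_foldl_keys (fun mass => pvLinearScoreMasstide mass Spectrum) ms PySem.Dict.empty]
  have hkeys : PySem.Set.update (PySem.Dict.empty (κ := Int) (ν := List (List Int))).keys
        (ms.map (fun mass => pvLinearScoreMasstide mass Spectrum))
      = PySem.Set.ofList (ms.map (fun mass => pvLinearScoreMasstide mass Spectrum)) := by
    simp [PySem.Set.update, PySem.Set.ofList_eq_foldl]
  rw [hkeys]
  exact loops_eq (fun mass => pvLinearScoreMasstide mass Spectrum) ms _ N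
    (fun s => by
      rw [dict_foldl_getD (fun mass => pvLinearScoreMasstide mass Spectrum) ms PySem.Dict.empty s]
      simp) _ [] 0 rfl
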